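-- pv_equiv track=rewrite | github.com/FlexonaFFt/CodeRunYandex | RunSeason2/backend/426.the_honiest_devison.py/honiest_divison.py | can_divive_string
-- ===== SOURCE A (Python) =====
-- def can_divive_string(str):
--     char_count = {}
--     for char in str:
--         if char in char_count:
--             char_count[char] += 1
--         else:
--             char_count[char] = 1
--
--     can_simple_divive = True
--     first_element_count = next(iter(char_count.values()))
--     for element_count in char_count.values():
--         if element_count != first_element_count:
--             can_simple_divive = False
--             break
--
--     if can_simple_divive:
--         rezult = 1
--         length = len(str)
--
--         for k in range(1, length + 1):
--             if length % k == 0: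
--                 if all(count % k == 0 for count in char_count.values()):
--                     rezult = k
--         return rezult
--     else:
--         rezult = 1
--         '''length = len(str)
--
--         for k in range(1, length//2 + 1):
--             if length % k == 0:
--                 substring = str[:k]
--                 count = length // len(substring)
--                 if substring * count == str:
--                     rezult = max(rezult, count)'''
--         return rezult
-- ===== SOURCE B (Python) =====
-- def can_divive_string(str):
--     s = sorted(str)
--     runs = []
--     i = 0
--     while i < len(s):
--         j = i
--         while j < len(s) and s[j] == s[i]:
--             j += 1
--         runs.append(j - i)
--         i = j
--     first = runs[0]
--     return first if all(r == first for r in runs) else 1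
-- ===== Notes on version B (the rewrite author's own statement) =====
-- stated objective: simpler
-- what changed: B sorts the string and scans equal runs instead of building a hash counter, and returns the first run length directly when all runs are equal, dropping A's redundant divisor loop (whose answer is always the uniform count).
import Mathlib
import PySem

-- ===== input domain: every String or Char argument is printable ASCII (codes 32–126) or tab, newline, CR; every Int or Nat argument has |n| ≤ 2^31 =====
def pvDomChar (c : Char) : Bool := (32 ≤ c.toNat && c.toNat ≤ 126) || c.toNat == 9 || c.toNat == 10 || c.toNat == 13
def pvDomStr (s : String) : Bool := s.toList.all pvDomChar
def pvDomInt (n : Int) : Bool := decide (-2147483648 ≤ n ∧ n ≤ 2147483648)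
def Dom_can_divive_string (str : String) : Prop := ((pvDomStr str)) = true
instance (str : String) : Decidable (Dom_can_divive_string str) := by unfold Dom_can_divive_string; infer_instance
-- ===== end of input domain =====

-- B replaces A's hash-counter + redundant divisor loop by sort-then-group run lengths,
-- returning the first run length directly when all runs are equal (simpler; equivalence of return values proved below).


-- ===== PORT A =====
def can_divive_string (str : String) : Int :=
  let cs := str.toList
  let char_count := cs.foldl
    (fun d c => if d.contains c then d.modify c 0 (· + 1) else d.insert c 1)
    PySem.Dict.empty
  match char_count.values with
  | [] => 0   -- Python raises StopIteration here (only for str = ""); excluded by Pre_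
  | first_element_count :: _ =>
    let vals := char_count.values
    -- for-loop with break computing whether every count equals the first
    let can_simple_divive := vals.all (· == first_element_count)
    if can_simple_divive then
      let length : Int := (cs.length : Int)
      (PySem.List.pyRange 1 (length + 1) 1).foldl
        (fun rezult k =>
          if PySem.Int.mod length k == 0 then
            if vals.all (fun count => PySem.Int.mod count k == 0) then k else rezult
          else rezult) 1
    else 1

-- ===== PORT B =====
-- run lengths of consecutive equal elements (B's inner while-loop advancing j over the run)
def pvRunLengths : List Char → List Int
  | [] => []
  | a :: t => ((t.takeWhile (· == a)).length + 1 : Int) :: pvRunLengths (t.dropWhile (· == a))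
  termination_by l => l.length
  decreasing_by
    simp only [List.length_cons]
    exact Nat.lt_succ_of_le (List.length_dropWhile_le _ _)

def can_divive_string_alt (str : String) : Int :=
  let s := PySem.List.sorted str.toList (fun c => c) false
  let runs := pvRunLengths s
  match runs with
  | [] => 0   -- Python raises IndexError here (only for str = ""); excluded by Pre_
  | first :: _ => if runs.all (· == first) then first else 1

-- ===== PRECONDITION & SPEC =====
-- A raises StopIteration (and B IndexError) on the empty string; that input is excluded.
def Pre_can_divive_string (str : String) : Prop := str ≠ ""
instance (str : String) : Decidable (Pre_can_divive_string str) := by unfold Pre_can_divive_string; infer_instance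
def pvWitness_can_divive_string : String := "aabb"

def Spec_can_divive_string (str : String) (out : Int) : Prop := out = can_divive_string_alt str
instance (str : String) (out : Int) : Decidable (Spec_can_divive_string str out) := by unfold Spec_can_divive_string; infer_instance

-- ===== CLAIM (what is proved, stated in full; the proofs are below) =====
def Claim_equal_can_divive_string : Prop := ∀ (str : String), Dom_can_divive_string str → Pre_can_divive_string str → Spec_can_divive_string str (can_divive_string str)

-- ===== LEMMAS AND PROOFS =====

-- A's counting loop is collections.Counter
theorem pvFold_eq_counter (cs : List Char) :
    cs.foldl (fun d c => if d.contains c then d.modify c 0 (· + 1) else d.insert c 1) PySem.Dict.empty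
      = PySem.Dict.counter cs := by
  rw [PySem.Dict.counter_eq_foldl]
  congr 1
  funext d c
  by_cases h : d.contains c = true
  · simp [h]
  · have h0 : d.getD c 0 = 0 := PySem.Dict.getD_of_not_contains d 0 (by simpa using h)
    simp [h, PySem.Dict.modify, h0]

-- values of the counter: the distinct chars' counts
theorem pvValues_counter (cs : List Char) :
    (PySem.Dict.counter cs).values = (PySem.Set.ofList cs).map (fun k => (cs.count k : Int)) := by
  show ((PySem.Dict.counter cs).items).map (·.2) = _
  rw [PySem.Dict.items_counter]
  simp

-- sum of run lengths = length
theorem pvRunLengths_sum (l : List Char) : (pvRunLengths l).sum = (l.length : Int) := by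
  induction l using pvRunLengths.induct with
  | case1 => simp [pvRunLengths]
  | case2 a t ih =>
      have hlen : (t.takeWhile (· == a)).length + (t.dropWhile (· == a)).length = t.length := by
        rw [← List.length_append, List.takeWhile_append_dropWhile]
      simp only [pvRunLengths, List.sum_cons, ih, List.length_cons]
      push_cast
      omega

-- each run length is positive
theorem pvRunLengths_pos (l : List Char) : ∀ x ∈ pvRunLengths l, 1 ≤ x := by
  induction l using pvRunLengths.induct with
  | case1 => simp [pvRunLengths]
  | case2 a t ih =>
      intro x hx
      simp only [pvRunLengths, List.mem_cons] at hx
      rcases hx with h | h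
      · omega
      · exact ih x h

-- run lengths of a ≤-sorted list are a permutation of the counts of the distinct elements
theorem pvRunLengths_perm_counts (l : List Char) (h : l.Pairwise (· ≤ ·)) :
    (pvRunLengths l).Perm ((PySem.Set.ofList l).map (fun k => (l.count k : Int))) := by
  induction l using pvRunLengths.induct with
  | case1 => simp [pvRunLengths]
  | case2 a t ih =>
      have hpc := List.pairwise_cons.mp h
      have htw : ∀ x ∈ t.takeWhile (· == a), x = a := fun x hx => by
        simpa using List.mem_takeWhile_imp hx
      have hdw_pw : (t.dropWhile (· == a)).Pairwise (· ≤ ·) :=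
        hpc.2.sublist (List.dropWhile_sublist _)
      have hadw : a ∉ t.dropWhile (· == a) := by
        cases hE : t.dropWhile (· == a) with
        | nil => simp
        | cons b u =>
            have hba : (b == a) = false := by
              have := List.head_dropWhile_not (· == a) (l := t) (by simp [hE])
              simpa [hE] using this
            intro hmem
            have hbt : b ∈ t := (List.dropWhile_sublist _).mem (hE ▸ List.mem_cons_self)
            have hab : a ≤ b := hpc.1 _ hbt
            have hba' : b ≤ a := by
              rcases List.mem_cons.mp hmem with hq | hq
              · exact le_of_eq hq.symm
              · exact (List.pairwise_cons.mp (hE ▸ hdw_pw)).1 a hq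
            have : b = a := le_antisymm hba' hab
            simp [this] at hba
      have hsplit : t = t.takeWhile (· == a) ++ t.dropWhile (· == a) :=
        (List.takeWhile_append_dropWhile).symm
      have hcount_a : (a :: t).count a = (t.takeWhile (· == a)).length + 1 := by
        rw [List.count_cons_self]
        congr 1
        conv_lhs => rw [hsplit]
        rw [List.count_append, List.count_eq_length.mpr (fun b hb => (htw b hb).symm),
            List.count_eq_zero.mpr hadw, Nat.add_zero]
      have hcount_ne : ∀ k, k ≠ a → (a :: t).count k = (t.dropWhile (· == a)).count k := by
        intro k hk
        rw [List.count_cons_of_ne (Ne.symm hk)]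
        conv_lhs => rw [hsplit]
        rw [List.count_append, List.count_eq_zero.mpr (fun hm => hk (htw k hm)), Nat.zero_add]
      have hperm_set : (PySem.Set.discard (PySem.Set.ofList t) a).Perm
          (PySem.Set.ofList (t.dropWhile (· == a))) := by
        rw [List.perm_ext_iff_of_nodup
          (PySem.Set.nodup_discard _ _ (PySem.Set.nodup_ofList t)) (PySem.Set.nodup_ofList _)]
        intro k
        rw [PySem.Set.mem_discard, PySem.Set.mem_ofList, PySem.Set.mem_ofList]
        constructor
        · rintro ⟨hkt, hka⟩
          rw [hsplit] at hkt
          rcases List.mem_append.mp hkt with hm | hm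
          · exact absurd (htw k hm) hka
          · exact hm
        · intro hkdw
          exact ⟨(List.dropWhile_sublist _).mem hkdw, fun he => hadw (he ▸ hkdw)⟩
      have hmap : (PySem.Set.discard (PySem.Set.ofList t) a).map
            (fun k => (((a :: t).count k : Int)))
          = (PySem.Set.discard (PySem.Set.ofList t) a).map
            (fun k => (((t.dropWhile (· == a)).count k : Int))) := by
        refine List.map_congr_left fun k hk => ?_
        simp only [PySem.Set.mem_discard] at hk
        rw [hcount_ne k hk.2]
      simp only [pvRunLengths, PySem.Set.ofList_cons, List.map_cons]
      have hhead : (((a :: t).count a : Int)) = ((t.takeWhile (· == a)).length + 1 : Int) := by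
        rw [hcount_a]; push_cast; ring
      rw [hhead]
      exact ((ih hdw_pw).trans ((hperm_set.symm.map _).trans
        (List.Perm.of_eq hmap.symm))).cons _

-- the run-length list of the sorted string is a permutation of the counter's values
theorem pvRuns_perm (cs : List Char) :
    (pvRunLengths (PySem.List.sorted cs (fun c => c) false)).Perm
      ((PySem.Set.ofList cs).map (fun k => (cs.count k : Int))) := by
  have hsp : (PySem.List.sorted cs (fun c => c) false).Pairwise (· ≤ ·) :=
    PySem.List.sorted_pairwise cs (fun c => c)
  have h1 := pvRunLengths_perm_counts _ hsp
  have hcnt : ∀ k, (PySem.List.sorted cs (fun c => c) false).count k = cs.count k :=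
    fun k => (PySem.List.sorted_perm cs (fun c => c) false).count_eq k
  have hmap : (PySem.Set.ofList (PySem.List.sorted cs (fun c => c) false)).map
        (fun k => ((PySem.List.sorted cs (fun c => c) false).count k : Int))
      = (PySem.Set.ofList (PySem.List.sorted cs (fun c => c) false)).map
        (fun k => (cs.count k : Int)) :=
    List.map_congr_left fun k _ => by rw [hcnt]
  have hsets : (PySem.Set.ofList (PySem.List.sorted cs (fun c => c) false)).Perm
      (PySem.Set.ofList cs) := by
    rw [List.perm_ext_iff_of_nodup (PySem.Set.nodup_ofList _) (PySem.Set.nodup_ofList _)]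
    intro k
    rw [PySem.Set.mem_ofList, PySem.Set.mem_ofList,
        (PySem.List.sorted_perm cs (fun c => c) false).mem_iff]
  exact h1.trans ((List.Perm.of_eq hmap).trans (hsets.map _))

-- "all elements equal the head" transfers across permutations
theorem pvAllEq_perm {v w : List Int} (hp : v.Perm w) (hv : v ≠ []) (hw : w ≠ []) :
    (v.all (· == v.head hv) = true ↔ w.all (· == w.head hw) = true) := by
  constructor <;> intro h
  · have hmem : ∀ x ∈ w, x = v.head hv := by
      intro x hx
      have := List.all_eq_true.mp h x (hp.mem_iff.mpr hx)
      simpa using this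
    have hh : w.head hw = v.head hv := hmem _ (List.head_mem hw)
    refine List.all_eq_true.mpr fun x hx => by simpa [hh] using (hmem x hx)
  · have hmem : ∀ x ∈ v, x = w.head hw := by
      intro x hx
      have := List.all_eq_true.mp h x (hp.mem_iff.mp hx)
      simpa using this
    have hh : v.head hv = w.head hw := hmem _ (List.head_mem hv)
    refine List.all_eq_true.mpr fun x hx => by simpa [hh] using (hmem x hx)

-- a fold in which nothing qualifies keeps its accumulator
theorem pvFoldl_no_sat (t : List Int) (p : Int → Bool) (r : Int)
    (h : ∀ k ∈ t, p k = false) :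
    t.foldl (fun r k => if p k then k else r) r = r := by
  induction t generalizing r with
  | nil => rfl
  | cons b u ihu =>
      have hb := h b (by simp)
      simp only [List.foldl_cons, hb]
      exact ihu r (fun k hk => h k (List.mem_cons_of_mem _ hk))

-- the last qualifying element of a strictly increasing list wins the fold
theorem pvFoldl_last_sat (l : List Int) (p : Int → Bool) (c r0 : Int)
    (hc : c ∈ l) (hp : p c = true) (hmax : ∀ k ∈ l, p k = true → k ≤ c)
    (hsort : l.Pairwise (· < ·)) :
    l.foldl (fun r k => if p k then k else r) r0 = c := by
  induction l generalizing r0 with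
  | nil => cases hc
  | cons a t ih =>
      rcases List.mem_cons.mp hc with rfl | hct
      · have hnone : ∀ k ∈ t, p k = false := by
          intro k hk
          by_contra hpk
          have h1 := hmax k (List.mem_cons_of_mem _ hk) (by simpa using hpk)
          have h2 := (List.pairwise_cons.mp hsort).1 k hk
          omega
        simp only [List.foldl_cons, hp, if_true]
        exact pvFoldl_no_sat t p c hnone
      · simp only [List.foldl_cons]
        exact ih _ hct (fun k hk hpk => hmax k (List.mem_cons_of_mem _ hk) hpk)
          (List.pairwise_cons.mp hsort).2

-- the main equivalence on the character list
theorem pvMain (cs : List Char) (hne : cs ≠ []) :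
    (match (cs.foldl (fun d c => if d.contains c then d.modify c 0 (· + 1) else d.insert c 1)
        PySem.Dict.empty).values with
     | [] => (0 : Int)
     | first :: _ =>
       let vals := (cs.foldl (fun d c => if d.contains c then d.modify c 0 (· + 1) else d.insert c 1)
          PySem.Dict.empty).values
       if vals.all (· == first) then
         (PySem.List.pyRange 1 ((cs.length : Int) + 1) 1).foldl
           (fun rezult k =>
             if PySem.Int.mod (cs.length : Int) k == 0 then
               if vals.all (fun count => PySem.Int.mod count k == 0) then k else rezult
             else rezult) 1
       else 1)
    = (match pvRunLengths (PySem.List.sorted cs (fun c => c) false) with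
       | [] => (0 : Int)
       | first :: _ =>
         if (pvRunLengths (PySem.List.sorted cs (fun c => c) false)).all (· == first)
         then first else 1) := by
  rw [pvFold_eq_counter, pvValues_counter]
  -- nonemptiness of both lists
  have hVne : (PySem.Set.ofList cs).map (fun k => (cs.count k : Int)) ≠ [] := by
    simp only [ne_eq, List.map_eq_nil_iff]
    intro h0
    rcases List.exists_mem_of_ne_nil cs hne with ⟨x, hx⟩
    have : x ∈ PySem.Set.ofList cs := (PySem.Set.mem_ofList _ _).mpr hx
    simp [h0] at this
  have hsne : PySem.List.sorted cs (fun c => c) false ≠ [] := by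
    rw [ne_eq, PySem.List.sorted_eq_nil_iff]; exact hne
  have hRne : pvRunLengths (PySem.List.sorted cs (fun c => c) false) ≠ [] := by
    cases hE : PySem.List.sorted cs (fun c => c) false with
    | nil => exact absurd hE hsne
    | cons a t => simp [pvRunLengths]
  obtain ⟨v0, vt, hV⟩ := List.exists_cons_of_ne_nil hVne
  obtain ⟨r0, rt, hR⟩ := List.exists_cons_of_ne_nil hRne
  have hperm : (pvRunLengths (PySem.List.sorted cs (fun c => c) false)).Perm
      ((PySem.Set.ofList cs).map (fun k => (cs.count k : Int))) := pvRuns_perm cs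
  rw [hV, hR]
  simp only []
  have hiff := pvAllEq_perm (v := r0 :: rt) (w := v0 :: vt)
    (hV ▸ hR ▸ hperm) (List.cons_ne_nil _ _) (List.cons_ne_nil _ _)
  simp only [List.head_cons] at hiff
  by_cases hall : (v0 :: vt).all (· == v0) = true
  · -- uniform case
    have hallR : (r0 :: rt).all (· == r0) = true := hiff.mpr hall
    rw [if_pos hall, if_pos hallR]
    -- every value equals r0, and v0 = r0
    have hmemV : ∀ x ∈ v0 :: vt, x = v0 := by
      intro x hx; simpa using List.all_eq_true.mp hall x hx
    have hv0r0 : v0 = r0 := by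
      have : r0 ∈ v0 :: vt := (hV ▸ hR ▸ hperm).mem_iff.mp List.mem_cons_self
      exact (hmemV r0 this).symm
    have hmemV' : ∀ x ∈ v0 :: vt, x = r0 := fun x hx => (hmemV x hx).trans hv0r0
    -- r0 ≥ 1
    have hr0pos : 1 ≤ r0 :=
      pvRunLengths_pos _ r0 (hR ▸ List.mem_cons_self)
    -- sum of values = length
    have hsum : (v0 :: vt).sum = (cs.length : Int) := by
      have h1 : (pvRunLengths (PySem.List.sorted cs (fun c => c) false)).sum
          = ((PySem.List.sorted cs (fun c => c) false).length : Int) := pvRunLengths_sum _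
      have h2 := (hV ▸ hperm).sum_eq
      rw [← h2, h1, PySem.List.length_sorted]
    -- length = (number of values) * r0
    have hlen : (cs.length : Int) = ((v0 :: vt).length : Int) * r0 := by
      rw [← hsum]
      have := List.sum_eq_card_nsmul (v0 :: vt) r0 hmemV'
      simpa [nsmul_eq_mul] using this
    have hdvd : r0 ∣ (cs.length : Int) := ⟨((v0 :: vt).length : Int), by rw [hlen, mul_comm]⟩
    have hle : r0 ≤ (cs.length : Int) := by
      have hc : (1 : Int) ≤ ((v0 :: vt).length : Int) := by
        simp [List.length_cons]
      calc r0 = 1 * r0 := (one_mul r0).symm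
        _ ≤ ((v0 :: vt).length : Int) * r0 := by
            exact mul_le_mul_of_nonneg_right hc (by omega)
        _ = (cs.length : Int) := hlen.symm
    -- rewrite the nested ifs as a single test
    have hstep : (fun (rezult k : Int) =>
          if PySem.Int.mod (cs.length : Int) k == 0 then
            if (v0 :: vt).all (fun count => PySem.Int.mod count k == 0) then k else rezult
          else rezult)
        = (fun (rezult k : Int) =>
          if ((PySem.Int.mod (cs.length : Int) k == 0)
              && (v0 :: vt).all (fun count => PySem.Int.mod count k == 0)) then k
          else rezult) := by
      funext r k
      by_cases h1 : (PySem.Int.mod (cs.length : Int) k == 0) = true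
      · simp [h1]
      · simp [Bool.eq_false_iff.mpr h1]
    rw [hstep]
    refine pvFoldl_last_sat _ _ r0 1 ?_ ?_ ?_ (PySem.List.pairwise_lt_pyRange_one 1 _)
    · rw [PySem.List.mem_pyRange_one]
      omega
    · rw [Bool.and_eq_true]
      constructor
      · simpa using (PySem.Int.mod_eq_zero_iff_dvd _ _).mpr hdvd
      · refine List.all_eq_true.mpr fun x hx => ?_
        rw [hmemV' x hx]
        simpa using (PySem.Int.mod_eq_zero_iff_dvd _ _).mpr dvd_rfl
    · intro k hk hpk
      rw [Bool.and_eq_true] at hpk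
      have hkdvd : k ∣ r0 := by
        have := List.all_eq_true.mp hpk.2 v0 List.mem_cons_self
        rw [← hv0r0]
        exact (PySem.Int.mod_eq_zero_iff_dvd _ _).mp (by simpa using this)
      have hk1 : 1 ≤ k := (PySem.List.mem_pyRange_one.mp hk).1
      exact Int.le_of_dvd (by omega) hkdvd
  · -- non-uniform case: both sides return 1
    have hallR : ¬ (r0 :: rt).all (· == r0) = true := fun hc => hall (hiff.mp hc)
    rw [if_neg hall, if_neg hallR]

-- ===== VERDICT (by name: the statement is the Claim_ definition above) =====
theorem can_divive_string_spec : Claim_equal_can_divive_string := by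
  intro str _hdom hpre
  unfold Spec_can_divive_string can_divive_string can_divive_string_alt
  simp only []
  exact pvMain str.toList (fun h => hpre (String.toList_eq_nil_iff.mp h))
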